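-- pv_equiv track=rewrite | github.com/yottapulsky/uftrace | scripts/retval-histogram.py | get_histogram_index
-- ===== SOURCE A (Python) =====
-- unit = 'b'
--
-- divider = {
--     'b': 1,
--     'k': 1000,
--     'K': 1000,
--     'm': 1000000,
--     'M': 1000000,
--     'g': 1000000000,
--     'G': 1000000000,
-- }
--
-- def get_histogram_index(val):
--     if val < 0:
--         return 0
--     val = int(val / divider[unit])
--     for i in range(10):
--         if val < (1 << (i+1)):
--             return i+1
--     return 11
-- ===== SOURCE B (Python) =====
-- unit = 'b'
--
-- divider = {
--     'b': 1,
--     'k': 1000,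
--     'K': 1000,
--     'm': 1000000,
--     'M': 1000000,
--     'g': 1000000000,
--     'G': 1000000000,
-- }
--
-- def get_histogram_index(val):
--     if val < 0:
--         return 0
--     val = int(val / divider[unit])
--     return min(11, max(1, val.bit_length()))
-- ===== Notes on version B (the rewrite author's own statement) =====
-- stated objective: simpler
-- what changed: The fixed power-of-two scanning loop is replaced by a direct closed form on the value's bit length, clamped between the first and last bucket.
import Mathlib
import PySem

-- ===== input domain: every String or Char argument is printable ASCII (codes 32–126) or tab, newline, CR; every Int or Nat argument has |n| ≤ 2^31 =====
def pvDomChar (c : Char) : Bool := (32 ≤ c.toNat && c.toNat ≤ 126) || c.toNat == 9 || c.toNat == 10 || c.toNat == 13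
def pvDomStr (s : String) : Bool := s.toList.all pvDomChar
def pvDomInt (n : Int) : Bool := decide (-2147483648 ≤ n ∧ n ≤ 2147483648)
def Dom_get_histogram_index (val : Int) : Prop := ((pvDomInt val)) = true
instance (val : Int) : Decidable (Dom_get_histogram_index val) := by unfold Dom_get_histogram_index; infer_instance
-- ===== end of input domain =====

-- B replaces A's fixed power-of-two scanning loop by a closed form on the bit length, clamped between the first and last bucket (simpler).

-- ===== PORT A =====
-- module constants, shared by both ports
def pvUnit : String := "b"
def pvDivider : PySem.Dict String Int :=
  PySem.Dict.ofList [("b", 1), ("k", 1000), ("K", 1000), ("m", 1000000),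
                     ("M", 1000000), ("g", 1000000000), ("G", 1000000000)]

-- for i in range(10): if val < (1 << (i+1)): return i+1  /  return 11
def pvLoopA (val : Int) : List Int → Int
  | [] => 11
  | i :: rest => if val < (1 <<< (i + 1).toNat) then i + 1 else pvLoopA val rest

def get_histogram_index (val : Int) : Int :=
  if val < 0 then 0
  else
    -- int(val / divider[unit]): divider['b'] = 1, float division by 1 is exact, so this is val;
    -- ported as floor division by the looked-up divider (equal for divisor 1).
    let v := PySem.Int.floordiv val ((PySem.Dict.get? pvDivider pvUnit).getD 0)
    pvLoopA v (PySem.List.pyRange 0 10 1)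

-- ===== PORT B =====
def get_histogram_index_alt (val : Int) : Int :=
  if val < 0 then 0
  else
    let v := PySem.Int.floordiv val ((PySem.Dict.get? pvDivider pvUnit).getD 0)
    min 11 (max 1 ((PySem.Int.bitLength v : Int)))

-- ===== PRECONDITION & SPEC =====
def Spec_get_histogram_index (val : Int) (out : Int) : Prop := out = get_histogram_index_alt val
instance (val : Int) (out : Int) : Decidable (Spec_get_histogram_index val out) := by unfold Spec_get_histogram_index; infer_instance

-- ===== CLAIM (what is proved, stated in full; the proofs are below) =====
def Claim_equal_get_histogram_index : Prop := ∀ (val : Int), Dom_get_histogram_index val → Spec_get_histogram_index val (get_histogram_index val)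

-- ===== LEMMAS AND PROOFS =====

-- val < 2^k  ↔  val.bit_length() ≤ k   (for 0 ≤ val)
lemma pv_bl_le_iff (val : Int) (h : 0 ≤ val) (k : Nat) :
    val < 2 ^ k ↔ PySem.Int.bitLength val ≤ k := by
  have hna : (val.natAbs : Int) = val := Int.natAbs_of_nonneg h
  have h2k : ((2 ^ k : Nat) : Int) = (2 : Int) ^ k := by push_cast; ring
  constructor
  · intro hv
    by_cases h0 : val = 0
    · subst h0; simp [PySem.Int.bitLength_zero]
    · have h2 := PySem.Int.two_pow_bitLength_le val h0
      have hk : val.natAbs < 2 ^ k := by omega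
      have hlt : 2 ^ (PySem.Int.bitLength val - 1) < 2 ^ k := lt_of_le_of_lt h2 hk
      have := (Nat.pow_lt_pow_iff_right (by norm_num : 1 < 2)).mp hlt
      omega
  · intro hb
    have h1 := PySem.Int.lt_two_pow_bitLength val
    have hle : (2 : Nat) ^ PySem.Int.bitLength val ≤ 2 ^ k :=
      Nat.pow_le_pow_right (by norm_num) hb
    have : val.natAbs < 2 ^ k := lt_of_lt_of_le h1 hle
    omega

lemma pv_loop_eq (val : Int) (h : 0 ≤ val) :
    pvLoopA val (PySem.List.pyRange 0 10 1) =
      min 11 (max 1 ((PySem.Int.bitLength val : Int))) := by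
  have hr : PySem.List.pyRange 0 10 1 = [0, 1, 2, 3, 4, 5, 6, 7, 8, 9] := by decide
  rw [hr]
  have b1 : val < 2 ↔ PySem.Int.bitLength val ≤ 1 := by simpa using pv_bl_le_iff val h 1
  have b2 : val < 4 ↔ PySem.Int.bitLength val ≤ 2 := by simpa using pv_bl_le_iff val h 2
  have b3 : val < 8 ↔ PySem.Int.bitLength val ≤ 3 := by simpa using pv_bl_le_iff val h 3
  have b4 : val < 16 ↔ PySem.Int.bitLength val ≤ 4 := by simpa using pv_bl_le_iff val h 4
  have b5 : val < 32 ↔ PySem.Int.bitLength val ≤ 5 := by simpa using pv_bl_le_iff val h 5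
  have b6 : val < 64 ↔ PySem.Int.bitLength val ≤ 6 := by simpa using pv_bl_le_iff val h 6
  have b7 : val < 128 ↔ PySem.Int.bitLength val ≤ 7 := by simpa using pv_bl_le_iff val h 7
  have b8 : val < 256 ↔ PySem.Int.bitLength val ≤ 8 := by simpa using pv_bl_le_iff val h 8
  have b9 : val < 512 ↔ PySem.Int.bitLength val ≤ 9 := by simpa using pv_bl_le_iff val h 9
  have b10 : val < 1024 ↔ PySem.Int.bitLength val ≤ 10 := by simpa using pv_bl_le_iff val h 10
  simp only [pvLoopA,
    show ((1 <<< ((0:Int) + 1).toNat : Nat) : Int) = 2 from by decide,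
    show ((1 <<< ((1:Int) + 1).toNat : Nat) : Int) = 4 from by decide,
    show ((1 <<< ((2:Int) + 1).toNat : Nat) : Int) = 8 from by decide,
    show ((1 <<< ((3:Int) + 1).toNat : Nat) : Int) = 16 from by decide,
    show ((1 <<< ((4:Int) + 1).toNat : Nat) : Int) = 32 from by decide,
    show ((1 <<< ((5:Int) + 1).toNat : Nat) : Int) = 64 from by decide,
    show ((1 <<< ((6:Int) + 1).toNat : Nat) : Int) = 128 from by decide,
    show ((1 <<< ((7:Int) + 1).toNat : Nat) : Int) = 256 from by decide,
    show ((1 <<< ((8:Int) + 1).toNat : Nat) : Int) = 512 from by decide,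
    show ((1 <<< ((9:Int) + 1).toNat : Nat) : Int) = 1024 from by decide]
  split_ifs <;> omega

-- ===== VERDICT (by name: the statement is the Claim_ definition above) =====
theorem get_histogram_index_spec : Claim_equal_get_histogram_index := by
  intro val _
  unfold Spec_get_histogram_index get_histogram_index get_histogram_index_alt
  by_cases hneg : val < 0
  · simp [hneg]
  · simp only [hneg]
    have hd : (PySem.Dict.get? pvDivider pvUnit).getD 0 = 1 := by decide
    rw [hd]
    have hfd : PySem.Int.floordiv val 1 = val := by
      rw [PySem.Int.floordiv_eq_ediv_of_pos (by norm_num)]; exact Int.ediv_one val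
    simp only [hfd]
    exact pv_loop_eq val (by omega)
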